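-- pv_equiv track=rewrite | github.com/Kunalpod/codewars | simple_fun_#204_smallest_integer.py | smallest_integer
-- ===== SOURCE A (Python) =====
-- from itertools import groupby, chain
--
-- def smallest_integer(matrix):
--     min = pos = 0
--     for key,_ in groupby([x for x in sorted(list(chain.from_iterable(matrix))) if x>=0]):
--         if key==min:
--             min+=1
--             pos+=1
--         else:
--             return min
--     return min
-- ===== SOURCE B (Python) =====
-- def smallest_integer(matrix):
--     s = {x for row in matrix for x in row}
--     c = 0
--     while c in s:
--         c += 1
--     return c
-- ===== Notes on version B (the rewrite author's own statement) =====
-- stated objective: faster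
-- what changed: replaces flatten+sort+groupby scan by a hash set and a counter incremented while present (mex)
import Mathlib
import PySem

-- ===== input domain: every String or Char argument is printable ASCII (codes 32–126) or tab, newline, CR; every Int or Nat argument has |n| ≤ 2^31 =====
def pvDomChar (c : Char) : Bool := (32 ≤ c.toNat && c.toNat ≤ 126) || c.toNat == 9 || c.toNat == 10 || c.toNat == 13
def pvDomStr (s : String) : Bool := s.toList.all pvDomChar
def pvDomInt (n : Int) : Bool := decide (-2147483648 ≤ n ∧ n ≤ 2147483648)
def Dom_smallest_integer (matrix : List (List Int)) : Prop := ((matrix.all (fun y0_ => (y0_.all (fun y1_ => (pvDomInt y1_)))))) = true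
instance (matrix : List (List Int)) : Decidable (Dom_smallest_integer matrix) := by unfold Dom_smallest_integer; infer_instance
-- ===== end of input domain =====

-- B replaces A's flatten+sort+groupby scan by a set and a counter incremented while present (mex).

-- ===== PORT A =====
-- keys of itertools.groupby: first element, then recurse past the run of equal elements
def pvGroupKeys (l : List Int) : List Int :=
  match l with
  | [] => []
  | x :: xs => x :: pvGroupKeys (xs.dropWhile (fun z => z == x))
termination_by l.length
decreasing_by
  simpa using Nat.lt_succ_of_le (List.length_dropWhile_le _ _)

-- the for-loop of A over the groupby keys, carrying (min, pos); returns min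
def pvALoop (ks : List Int) (mn pos : Int) : Int :=
  match ks with
  | [] => mn
  | k :: ks' => if k = mn then pvALoop ks' (mn + 1) (pos + 1) else mn

def smallest_integer (matrix : List (List Int)) : Int :=
  pvALoop (pvGroupKeys (((PySem.List.sorted (matrix.flatMap id) (fun x => x) false)).filter
    (fun x => decide (0 ≤ x)))) 0 0

-- ===== PORT B =====
-- the while-loop 'while c in s: c += 1'; fuel len(s)+1 suffices (the counter visits distinct members of s)
def pvBLoop (s : PySem.Set Int) (c : Int) (fuel : Nat) : Int :=
  match fuel with
  | 0 => c
  | fuel + 1 => if c ∈ s then pvBLoop s (c + 1) fuel else c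

def smallest_integer_alt (matrix : List (List Int)) : Int :=
  let s : PySem.Set Int := PySem.Set.ofList (matrix.flatMap id)
  pvBLoop s 0 (s.length + 1)

-- ===== PRECONDITION & SPEC =====
def Spec_smallest_integer (matrix : List (List Int)) (out : Int) : Prop := out = smallest_integer_alt matrix
instance (matrix : List (List Int)) (out : Int) : Decidable (Spec_smallest_integer matrix out) := by unfold Spec_smallest_integer; infer_instance

-- ===== CLAIM (what is proved, stated in full; the proofs are below) =====
def Claim_equal_smallest_integer : Prop := ∀ (matrix : List (List Int)), Dom_smallest_integer matrix → Spec_smallest_integer matrix (smallest_integer matrix)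

-- ===== LEMMAS AND PROOFS =====

theorem pvGroupKeys_mem (l : List Int) (a : Int) : a ∈ pvGroupKeys l ↔ a ∈ l := by
  induction l using pvGroupKeys.induct with
  | case1 => simp [pvGroupKeys]
  | case2 x xs ih =>
    rw [pvGroupKeys]
    simp only [List.mem_cons, ih]
    constructor
    · rintro (rfl | h)
      · exact Or.inl rfl
      · exact Or.inr ((xs.dropWhile_sublist _).mem h)
    · rintro (rfl | h)
      · exact Or.inl rfl
      · by_cases hax : a = x
        · exact Or.inl hax
        · refine Or.inr ?_
          -- a is in xs but not equal to x, so it survives dropWhile (== x)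
          rw [← List.takeWhile_append_dropWhile (p := fun z => z == x) (l := xs),
            List.mem_append] at h
          rcases h with h1 | h1
          · exact absurd (by simpa using List.mem_takeWhile_imp h1) hax
          · exact h1

theorem pvDrop_gt (x : Int) (xs : List Int) (hp : xs.Pairwise (· ≤ ·))
    (hge : ∀ z ∈ xs, x ≤ z) :
    ∀ y ∈ xs.dropWhile (fun z => z == x), x < y := by
  induction xs with
  | nil => simp
  | cons a t ih =>
    intro y hy
    rw [List.dropWhile_cons] at hy
    by_cases hax : a = x
    · simp only [hax, beq_self_eq_true, if_true] at hy
      exact ih hp.of_cons (fun z hz => hge z (List.mem_cons_of_mem _ hz)) y hy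
    · have : ((a == x) = true) ↔ (a = x) := beq_iff_eq
      simp only [show (a == x) = false by simp [hax]] at hy
      have hxa : x < a := lt_of_le_of_ne (hge a List.mem_cons_self) (Ne.symm hax)
      rcases List.mem_cons.mp hy with rfl | hy
      · exact hxa
      · exact lt_of_lt_of_le hxa ((List.pairwise_cons.mp hp).1 y hy)

theorem pvGroupKeys_pairwise (l : List Int) (hp : l.Pairwise (· ≤ ·)) :
    (pvGroupKeys l).Pairwise (· < ·) := by
  induction l using pvGroupKeys.induct with
  | case1 => simp [pvGroupKeys]
  | case2 x xs ih =>
    rw [pvGroupKeys]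
    refine List.pairwise_cons.mpr ⟨?_, ih (hp.of_cons.sublist (xs.dropWhile_sublist _))⟩
    intro y hy
    exact pvDrop_gt x xs hp.of_cons (fun z hz => (List.pairwise_cons.mp hp).1 z hz) y
      ((pvGroupKeys_mem _ y).mp hy)

-- the central loop correspondence: A's scan of the strictly increasing key list
-- equals B's counter loop, given the membership invariant
theorem pvLoop_eq (ks : List Int) (s : PySem.Set Int) (m pos : Int)
    (hp : ks.Pairwise (· < ·))
    (hm : ∀ x, x ∈ ks ↔ (x ∈ s ∧ m ≤ x)) :
    ∀ fuel, ks.length + 1 ≤ fuel → pvALoop ks m pos = pvBLoop s m fuel := by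
  induction ks generalizing m pos with
  | nil =>
    intro fuel hf
    match fuel, hf with
    | fuel + 1, _ =>
      have hms : m ∉ s := fun h => by simpa using (hm m).mpr ⟨h, le_refl m⟩
      simp [pvALoop, pvBLoop, hms]
  | cons k ks' ih =>
    intro fuel hf
    match fuel, hf with
    | fuel + 1, hf =>
      have hkm : m ≤ k := ((hm k).mp List.mem_cons_self).2
      by_cases hk : k = m
      · have hmem : m ∈ s := hk ▸ ((hm k).mp List.mem_cons_self).1
        rw [pvALoop, pvBLoop, if_pos hk, if_pos hmem]
        refine ih (m + 1) (pos + 1) hp.of_cons ?_ fuel (by simpa using hf)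
        intro x
        constructor
        · intro hx
          have hxk : k < x := (List.pairwise_cons.mp hp).1 x hx
          exact ⟨((hm x).mpr ⟨(((hm x).mp (List.mem_cons_of_mem _ hx)).1),
            le_of_lt (hk ▸ hxk)⟩ |> fun _ => ((hm x).mp (List.mem_cons_of_mem _ hx)).1),
            by omega⟩
        · rintro ⟨hxs, hx1⟩
          have hx : x ∈ k :: ks' := (hm x).mpr ⟨hxs, by omega⟩
          rcases List.mem_cons.mp hx with rfl | hx
          · omega
          · exact hx
      · have hms : m ∉ s := by
          intro h
          have : m ∈ k :: ks' := (hm m).mpr ⟨h, le_refl m⟩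
          rcases List.mem_cons.mp this with rfl | hmem'
          · exact hk rfl
          · have := (List.pairwise_cons.mp hp).1 m hmem'
            omega
        rw [pvALoop, pvBLoop, if_neg hk, if_neg hms]

-- ===== VERDICT (by name: the statement is the Claim_ definition above) =====
theorem smallest_integer_spec : Claim_equal_smallest_integer := by
  intro matrix _
  unfold Spec_smallest_integer smallest_integer smallest_integer_alt
  set flat := matrix.flatMap id with hflat
  set srt := PySem.List.sorted flat (fun x => x) false with hsrt
  set fl := srt.filter (fun x => decide (0 ≤ x)) with hfl
  set ks := pvGroupKeys fl with hks
  set s : PySem.Set Int := PySem.Set.ofList flat with hs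
  have hsortpair : srt.Pairwise (· ≤ ·) := by
    simpa using PySem.List.sorted_pairwise (xs := flat) (key := fun x => x)
  have hfp : fl.Pairwise (· ≤ ·) := hsortpair.filter _
  have hpk : ks.Pairwise (· < ·) := pvGroupKeys_pairwise fl hfp
  have hmem : ∀ x, x ∈ ks ↔ (x ∈ s ∧ (0:Int) ≤ x) := by
    intro x
    rw [hks, pvGroupKeys_mem, hfl, List.mem_filter, hsrt, PySem.List.mem_sorted, hs,
      PySem.Set.mem_ofList]
    simp
  have hlen : ks.length + 1 ≤ s.length + 1 := by
    have hnd : ks.Nodup := hpk.nodup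
    have hsub : ks ⊆ s := fun x hx => ((hmem x).mp hx).1
    exact Nat.succ_le_succ ((hnd.subperm hsub).length_le)
  exact pvLoop_eq ks s 0 0 hpk hmem (s.length + 1) hlen
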